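-- pv_equiv track=rewrite | github.com/BTheDragonMaster/pikachu | pikachu/chem/chirality.py | find_chirality_from_nonh
-- ===== SOURCE A (Python) =====
-- def get_chiral_permutations(order):
--     permutations = [tuple(order),
--                     (order[0], order[3], order[1], order[2]),
--                     (order[0], order[2], order[3], order[1]),
--                     (order[1], order[0], order[3], order[2]),
--                     (order[1], order[2], order[0], order[3]),
--                     (order[1], order[3], order[2], order[0]),
--                     (order[2], order[0], order[1], order[3]),
--                     (order[2], order[3], order[0], order[1]),
--                     (order[2], order[1], order[3], order[0]),
--                     (order[3], order[0], order[2], order[1]),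
--                     (order[3], order[1], order[0], order[2]),
--                     (order[3], order[2], order[1], order[0])]
--
--     return permutations
--
-- def find_chirality_from_nonh(neighbours, order, chirality):
--     permutations = get_chiral_permutations(neighbours)
--     for permutation in permutations:
--
--         if tuple(permutation[:3]) == tuple(order):
--             return chirality
--
--     if chirality == 'counterclockwise':
--         return 'clockwise'
--     else:
--         return 'counterclockwise'
-- ===== SOURCE B (Python) =====
-- def find_chirality_from_nonh(neighbours, order, chirality):
--     flipped = 'clockwise' if chirality == 'counterclockwise' else 'counterclockwise'
--     top = [neighbours[0], neighbours[1], neighbours[2], neighbours[3]]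
--     if len(order) != 3:
--         return flipped
--     x, y, z = order
--     rest = list(top)
--     for v in (x, y, z):
--         if v in rest:
--             rest.remove(v)
--         else:
--             return flipped
--     if len(set(top)) < 4:
--         # a repeated neighbour makes both parities realisable, so any placeable order matches
--         return chirality
--     i0, i1, i2, i3 = top.index(x), top.index(y), top.index(z), top.index(rest[0])
--     inversions = (i0 > i1) + (i0 > i2) + (i0 > i3) + (i1 > i2) + (i1 > i3) + (i2 > i3)
--     return chirality if inversions % 2 == 0 else flipped
-- ===== Notes on version B (the rewrite author's own statement) =====
-- stated objective: alternative
-- what changed: B replaces A's scan over the 12 hard-coded even permutations by placing order's three elements (plus the one leftover neighbour) inside the neighbour list and checking the parity of the resulting index permutation, with a duplicate neighbour making both parities realisable; the no-match/unplaceable case returns the flipped chirality exactly as A does.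
import Mathlib
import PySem

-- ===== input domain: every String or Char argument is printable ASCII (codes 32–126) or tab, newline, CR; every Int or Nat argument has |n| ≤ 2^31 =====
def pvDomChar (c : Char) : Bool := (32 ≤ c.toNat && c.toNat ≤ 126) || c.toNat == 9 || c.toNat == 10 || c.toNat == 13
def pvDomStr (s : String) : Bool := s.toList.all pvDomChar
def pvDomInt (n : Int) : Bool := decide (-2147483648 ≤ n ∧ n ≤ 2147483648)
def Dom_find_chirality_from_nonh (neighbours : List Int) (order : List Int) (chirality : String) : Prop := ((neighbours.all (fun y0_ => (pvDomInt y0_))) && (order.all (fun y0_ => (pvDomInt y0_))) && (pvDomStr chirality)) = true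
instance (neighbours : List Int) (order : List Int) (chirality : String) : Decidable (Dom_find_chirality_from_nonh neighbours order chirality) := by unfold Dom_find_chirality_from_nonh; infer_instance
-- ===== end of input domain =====

-- B replaces A's scan over the 12 hard-coded even permutations by placing the three ordered
-- neighbours (plus the one left over) inside the neighbour list and checking the parity of the
-- resulting index permutation (any duplicate neighbour makes both parities realisable); same
-- return value everywhere A returns (objective: alternative algorithm, not speed).

-- ===== PORT A =====
def get_chiral_permutations (order : List Int) : Option (List (List Int)) :=
  match PySem.List.pyGet? order 0, PySem.List.pyGet? order 1,
        PySem.List.pyGet? order 2, PySem.List.pyGet? order 3 with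
  | some o0, some o1, some o2, some o3 =>
      some [order,
            [o0, o3, o1, o2], [o0, o2, o3, o1], [o1, o0, o3, o2],
            [o1, o2, o0, o3], [o1, o3, o2, o0], [o2, o0, o1, o3],
            [o2, o3, o0, o1], [o2, o1, o3, o0], [o3, o0, o2, o1],
            [o3, o1, o0, o2], [o3, o2, o1, o0]]
  | _, _, _, _ => none   -- IndexError: len(order) < 4

-- the 'for permutation in permutations: if tuple(permutation[:3]) == tuple(order): return chirality' loop
def fcLoop (order : List Int) (chirality : String) : List (List Int) → String
  | [] => if chirality == "counterclockwise" then "clockwise" else "counterclockwise"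
  | p :: ps =>
      if PySem.List.slice p none (some 3) = order then chirality
      else fcLoop order chirality ps

def find_chirality_from_nonh (neighbours : List Int) (order : List Int) (chirality : String) : String :=
  match get_chiral_permutations neighbours with
  | some permutations => fcLoop order chirality permutations
  | none => ""   -- Python raises IndexError here (len(neighbours) < 4); excluded by Pre_

-- ===== PORT B =====
-- the 'for v in (x, y, z): if v in rest: rest.remove(v) else: return flipped' loop
def fcRemoveAll {α : Type} [BEq α] (vs : List α) (rest : List α) : Option (List α) :=
  match vs with
  | [] => some rest
  | v :: vt =>
      match PySem.List.remove? rest v with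
      | some r => fcRemoveAll vt r
      | none => none

def find_chirality_from_nonh_alt (neighbours : List Int) (order : List Int) (chirality : String) : String :=
  let flipped := if chirality == "counterclockwise" then "clockwise" else "counterclockwise"
  match PySem.List.pyGet? neighbours 0, PySem.List.pyGet? neighbours 1,
        PySem.List.pyGet? neighbours 2, PySem.List.pyGet? neighbours 3 with
  | some n0, some n1, some n2, some n3 =>
      let top : List Int := [n0, n1, n2, n3]
      match order with
      | [x, y, z] =>
          match fcRemoveAll [x, y, z] top with
          | none => flipped
          | some rest =>
              if (PySem.Set.ofList top).length < 4 then chirality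
              else
                let i0 := (PySem.List.index? top x).getD 0
                let i1 := (PySem.List.index? top y).getD 0
                let i2 := (PySem.List.index? top z).getD 0
                let i3 := (PySem.List.index? top (PySem.List.pyGetD rest 0 0)).getD 0
                let inversions : Int :=
                  (if i0 > i1 then 1 else 0) + (if i0 > i2 then 1 else 0) +
                  (if i0 > i3 then 1 else 0) + (if i1 > i2 then 1 else 0) +
                  (if i1 > i3 then 1 else 0) + (if i2 > i3 then 1 else 0)
                if PySem.Int.mod inversions 2 == 0 then chirality else flipped
      | _ => flipped
  | _, _, _, _ => ""   -- Python raises IndexError here (fewer than four neighbours); excluded by Pre_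

-- ===== PRECONDITION & SPEC =====
-- Pre_ excludes exactly the inputs where Python A raises IndexError (fewer than four neighbours).
def Pre_find_chirality_from_nonh (neighbours : List Int) (order : List Int) (chirality : String) : Prop :=
  4 ≤ neighbours.length
instance (neighbours : List Int) (order : List Int) (chirality : String) : Decidable (Pre_find_chirality_from_nonh neighbours order chirality) := by unfold Pre_find_chirality_from_nonh; infer_instance

def pvWitness_find_chirality_from_nonh : List Int × List Int × String := ([1, 2, 3, 4], [2, 1, 3], "clockwise")

def Spec_find_chirality_from_nonh (neighbours : List Int) (order : List Int) (chirality : String) (out : String) : Prop := out = find_chirality_from_nonh_alt neighbours order chirality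
instance (neighbours : List Int) (order : List Int) (chirality : String) (out : String) : Decidable (Spec_find_chirality_from_nonh neighbours order chirality out) := by unfold Spec_find_chirality_from_nonh; infer_instance

-- ===== CLAIM (what is proved, stated in full; the proofs are below) =====
def Claim_equal_find_chirality_from_nonh : Prop := ∀ (neighbours : List Int) (order : List Int) (chirality : String), Dom_find_chirality_from_nonh neighbours order chirality → Pre_find_chirality_from_nonh neighbours order chirality → Spec_find_chirality_from_nonh neighbours order chirality (find_chirality_from_nonh neighbours order chirality)
-- ===== LEMMAS AND PROOFS =====

lemma pg0 (a b c d : Int) (r : List Int) : PySem.List.pyGet? (a :: b :: c :: d :: r) (0 : Int) = some a := by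
  rw [show (0 : Int) = ((0 : Nat) : Int) from rfl, PySem.List.pyGet?_natCast]; rfl
lemma pg1 (a b c d : Int) (r : List Int) : PySem.List.pyGet? (a :: b :: c :: d :: r) (1 : Int) = some b := by
  rw [show (1 : Int) = ((1 : Nat) : Int) from rfl, PySem.List.pyGet?_natCast]; rfl
lemma pg2 (a b c d : Int) (r : List Int) : PySem.List.pyGet? (a :: b :: c :: d :: r) (2 : Int) = some c := by
  rw [show (2 : Int) = ((2 : Nat) : Int) from rfl, PySem.List.pyGet?_natCast]; rfl
lemma pg3 (a b c d : Int) (r : List Int) : PySem.List.pyGet? (a :: b :: c :: d :: r) (3 : Int) = some d := by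
  rw [show (3 : Int) = ((3 : Nat) : Int) from rfl, PySem.List.pyGet?_natCast]; rfl

-- Boolean core of A's scan: does the order list equal one of the 12 leading triples?
def acoreL (a b c d : Int) (o : List Int) : Bool :=
  ([a, b, c] == o) || (([a, d, b] == o) || (([a, c, d] == o) || (([b, a, d] == o) ||
  (([b, c, a] == o) || (([b, d, c] == o) || (([c, a, b] == o) || (([c, d, a] == o) ||
  (([c, b, d] == o) || (([d, a, c] == o) || (([d, b, a] == o) || ([d, c, b] == o)))))))))))

-- same core, component-wise, generic in the element type
def acoreG {A : Type} [DecidableEq A] (a b c d x y z : A) : Bool :=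
  (decide (a = x) && decide (b = y) && decide (c = z)) ||
  (decide (a = x) && decide (d = y) && decide (b = z)) ||
  (decide (a = x) && decide (c = y) && decide (d = z)) ||
  (decide (b = x) && decide (a = y) && decide (d = z)) ||
  (decide (b = x) && decide (c = y) && decide (a = z)) ||
  (decide (b = x) && decide (d = y) && decide (c = z)) ||
  (decide (c = x) && decide (a = y) && decide (b = z)) ||
  (decide (c = x) && decide (d = y) && decide (a = z)) ||
  (decide (c = x) && decide (b = y) && decide (d = z)) ||
  (decide (d = x) && decide (a = y) && decide (c = z)) ||
  (decide (d = x) && decide (b = y) && decide (a = z)) ||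
  (decide (d = x) && decide (c = y) && decide (b = z))

-- Boolean core of B, generic in the element type
def bcoreG {A : Type} [BEq A] [LawfulBEq A] (a b c d x y z : A) : Bool :=
  match fcRemoveAll [x, y, z] [a, b, c, d] with
  | none => false
  | some rest =>
      if (PySem.Set.ofList [a, b, c, d]).length < 4 then true
      else
        let i0 := (PySem.List.index? [a, b, c, d] x).getD 0
        let i1 := (PySem.List.index? [a, b, c, d] y).getD 0
        let i2 := (PySem.List.index? [a, b, c, d] z).getD 0
        let i3 := (PySem.List.index? [a, b, c, d] (rest.headD x)).getD 0
        let inversions : Int :=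
          (if i0 > i1 then 1 else 0) + (if i0 > i2 then 1 else 0) +
          (if i0 > i3 then 1 else 0) + (if i1 > i2 then 1 else 0) +
          (if i1 > i3 then 1 else 0) + (if i2 > i3 then 1 else 0)
        PySem.Int.mod inversions 2 == 0

lemma beq_list_eq_decide (p q : List Int) : (p == q) = decide (p = q) := by
  by_cases h : p = q <;> simp [h]

lemma fcLoop_any (o : List Int) (ch : String) :
    ∀ ps, fcLoop o ch ps =
      if ps.any (fun p => PySem.List.slice p none (some 3) == o) then ch
      else if ch == "counterclockwise" then "clockwise" else "counterclockwise" := by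
  intro ps
  induction ps with
  | nil => rfl
  | cons p pt ih =>
      simp only [fcLoop, List.any_cons]
      by_cases h : PySem.List.slice p none (some 3) = o
      · simp [h]
      · simp [h, ih]

lemma liftA (a b c d : Int) (r : List Int) (o : List Int) (ch : String) :
    find_chirality_from_nonh (a :: b :: c :: d :: r) o ch =
      if acoreL a b c d o then ch
      else if ch == "counterclockwise" then "clockwise" else "counterclockwise" := by
  have hs : PySem.List.slice (a :: b :: c :: d :: r) none (some 3) = [a, b, c] := by
    rw [PySem.List.slice_to _ (by norm_num)]; rfl
  have e2 : PySem.List.slice [a, d, b, c] none (some 3) = [a, d, b] := rfl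
  have e3 : PySem.List.slice [a, c, d, b] none (some 3) = [a, c, d] := rfl
  have e4 : PySem.List.slice [b, a, d, c] none (some 3) = [b, a, d] := rfl
  have e5 : PySem.List.slice [b, c, a, d] none (some 3) = [b, c, a] := rfl
  have e6 : PySem.List.slice [b, d, c, a] none (some 3) = [b, d, c] := rfl
  have e7 : PySem.List.slice [c, a, b, d] none (some 3) = [c, a, b] := rfl
  have e8 : PySem.List.slice [c, d, a, b] none (some 3) = [c, d, a] := rfl
  have e9 : PySem.List.slice [c, b, d, a] none (some 3) = [c, b, d] := rfl
  have e10 : PySem.List.slice [d, a, c, b] none (some 3) = [d, a, c] := rfl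
  have e11 : PySem.List.slice [d, b, a, c] none (some 3) = [d, b, a] := rfl
  have e12 : PySem.List.slice [d, c, b, a] none (some 3) = [d, c, b] := rfl
  simp only [find_chirality_from_nonh, get_chiral_permutations, pg0, pg1, pg2, pg3]
  rw [fcLoop_any]
  simp only [List.any_cons, List.any_nil, hs, e2, e3, e4, e5, e6, e7, e8, e9, e10, e11, e12,
    Bool.or_false]
  rfl

lemma fcRemoveAll_some {A : Type} [BEq A] [LawfulBEq A] :
    ∀ (vs l r : List A), fcRemoveAll vs l = some r → r.length + vs.length = l.length ∧ r ⊆ l := by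
  intro vs
  induction vs with
  | nil =>
      intro l r h
      simp only [fcRemoveAll] at h
      cases h
      exact ⟨by simp, fun _ hx => hx⟩
  | cons v vt ih =>
      intro l r h
      simp only [fcRemoveAll] at h
      cases hrem : PySem.List.remove? l v with
      | none => rw [hrem] at h; cases h
      | some r1 =>
          rw [hrem] at h
          have hv : v ∈ l := by
            by_contra hv
            rw [(PySem.List.remove?_eq_none_iff l v).mpr hv] at hrem
            cases hrem
          have he : r1 = l.erase v := by
            have := PySem.List.remove?_eq_some_erase l v hv
            rw [this] at hrem; cases hrem; rfl
          obtain ⟨hl, hsub⟩ := ih r1 r h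
          have hlen : r1.length = l.length - 1 := by rw [he]; exact List.length_erase_of_mem hv
          have hpos : 1 ≤ l.length := List.length_pos_of_mem hv
          constructor
          · simp only [List.length_cons]; omega
          · exact fun u hu => (he ▸ List.erase_subset) (hsub hu)

lemma rest_singleton {rest : List Int} (x y z a b c d : Int)
    (h : fcRemoveAll [x, y, z] [a, b, c, d] = some rest) :
    ∃ w, rest = [w] ∧ w ∈ ([a, b, c, d] : List Int) := by
  obtain ⟨hl, hsub⟩ := fcRemoveAll_some [x, y, z] [a, b, c, d] rest h
  simp only [List.length_cons, List.length_nil] at hl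
  rcases rest with _ | ⟨w, _ | ⟨w2, t⟩⟩
  · simp at hl
  · exact ⟨w, rfl, hsub (by simp)⟩
  · simp at hl

lemma liftB (a b c d : Int) (r : List Int) (x y z : Int) (ch : String) :
    find_chirality_from_nonh_alt (a :: b :: c :: d :: r) [x, y, z] ch =
      if bcoreG a b c d x y z then ch
      else if ch == "counterclockwise" then "clockwise" else "counterclockwise" := by
  simp only [find_chirality_from_nonh_alt, pg0, pg1, pg2, pg3, bcoreG]
  cases hrem : fcRemoveAll [x, y, z] ([a, b, c, d] : List Int) with
  | none => simp
  | some rest =>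
      obtain ⟨w, rfl, _⟩ := rest_singleton x y z a b c d hrem
      have hD : PySem.List.pyGetD ([w] : List Int) 0 0 = w := rfl
      have hH : ([w] : List Int).headD x = w := rfl
      by_cases hdup : (PySem.Set.ofList ([a, b, c, d] : List Int)).length < 4
      · simp [hdup]
      · simp only [hdup, if_false, hD, hH]

lemma acoreL_eq (a b c d x y z : Int) :
    acoreL a b c d [x, y, z] = acoreG a b c d x y z := by
  simp only [acoreL, acoreG, beq_list_eq_decide, List.cons.injEq, and_true, Bool.decide_and,
    Bool.and_assoc, Bool.or_assoc]

-- the canonical-pattern condition: every entry of the tuple points at its own first occurrence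
def pvCond (t : List Nat) : Bool := t.all (fun m => t.getD m 7 = m)

lemma key_fin_bool :
    ((List.range 2).all fun n1 => (List.range 3).all fun n2 => (List.range 4).all fun n3 =>
     (List.range 5).all fun n4 => (List.range 6).all fun n5 => (List.range 7).all fun n6 =>
       (!(pvCond [0, n1, n2, n3, n4, n5, n6])) ||
         (acoreG 0 n1 n2 n3 n4 n5 n6 == bcoreG 0 n1 n2 n3 n4 n5 n6)) = true := by
  decide

-- first-occurrence index of the i-th element is at most i
lemma idxOf_getElem_le {A : Type} [BEq A] [LawfulBEq A] :
    ∀ (l : List A) (i : Nat) (h : i < l.length), List.idxOf l[i] l ≤ i := by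
  intro l
  induction l with
  | nil => intro i h; simp at h
  | cons u t ih =>
      intro i h
      cases i with
      | zero => simp [List.idxOf_cons_self]
      | succ j =>
          by_cases hu : u = (u :: t)[j + 1]
          · rw [← hu, List.idxOf_cons_self]; omega
          · have hj : j < t.length := by simpa using h
            have : (u :: t)[j + 1] = t[j] := rfl
            rw [this] at hu ⊢
            rw [List.idxOf_cons_ne t hu]
            have := ih j hj
            omega

-- idxOf? is preserved by a map that preserves the equality pattern
lemma idxOf?_map {A B : Type} [BEq A] [LawfulBEq A] [BEq B] [LawfulBEq B] (f : A → B) (v : A) :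
    ∀ (l : List A), (∀ u ∈ l, (f u = f v ↔ u = v)) →
      List.idxOf? (f v) (l.map f) = List.idxOf? v l := by
  intro l
  induction l with
  | nil => intro _; rfl
  | cons u t ih =>
      intro hf
      have hu := hf u (by simp)
      by_cases h : u = v
      · simp [List.idxOf?_cons, h]
      · have hfu : f u ≠ f v := fun e => h (hu.mp e)
        simp [List.idxOf?_cons, h, hfu, ih (fun w hw => hf w (by simp [hw]))]

lemma remove?_map {A B : Type} [BEq A] [LawfulBEq A] [BEq B] [LawfulBEq B] (f : A → B) (v : A)
    (l : List A) (hf : ∀ u ∈ l, (f u = f v ↔ u = v)) :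
    PySem.List.remove? (l.map f) (f v) = (PySem.List.remove? l v).map (List.map f) := by
  simp only [PySem.List.remove?, idxOf?_map f v l hf]
  cases h : List.idxOf? v l with
  | none => rfl
  | some k => simp [List.eraseIdx_map]

lemma fcRemoveAll_map {A B : Type} [BEq A] [LawfulBEq A] [BEq B] [LawfulBEq B] (f : A → B) :
    ∀ (vs l : List A), (∀ v ∈ vs, ∀ u ∈ l, (f u = f v ↔ u = v)) →
      fcRemoveAll (vs.map f) (l.map f) = (fcRemoveAll vs l).map (List.map f) := by
  intro vs
  induction vs with
  | nil => intro l _; rfl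
  | cons v vt ih =>
      intro l hf
      simp only [List.map_cons, fcRemoveAll, remove?_map f v l (hf v (by simp))]
      cases hrem : PySem.List.remove? l v with
      | none => rfl
      | some r1 =>
          have hv : v ∈ l := by
            by_contra hv
            rw [(PySem.List.remove?_eq_none_iff l v).mpr hv] at hrem
            cases hrem
          have he : r1 = l.erase v := by
            have := PySem.List.remove?_eq_some_erase l v hv
            rw [this] at hrem; cases hrem; rfl
          have hsub : r1 ⊆ l := he ▸ List.erase_subset
          simp only [Option.map_some]
          exact ih r1 (fun w hw u hu => hf w (by simp [hw]) u (hsub hu))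

lemma foldl_add_map {A B : Type} [BEq A] [LawfulBEq A] [BEq B] [LawfulBEq B] (f : A → B) :
    ∀ (l s : List A), (∀ u v : A, (u ∈ s ∨ u ∈ l) → (v ∈ s ∨ v ∈ l) → (f u = f v ↔ u = v)) →
      List.foldl PySem.Set.add (s.map f) (l.map f) = (List.foldl PySem.Set.add s l).map f := by
  intro l
  induction l with
  | nil => intro s _; rfl
  | cons u t ih =>
      intro s hf
      have hadd : PySem.Set.add (s.map f) (f u) = (PySem.Set.add s u).map f := by
        have hc : (s.map f).contains (f u) = s.contains u := by
          rw [List.contains_eq_mem, List.contains_eq_mem, decide_eq_decide]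
          constructor
          · intro hm
            obtain ⟨w, hw, hwe⟩ := List.mem_map.mp hm
            exact (hf w u (Or.inl hw) (Or.inr (by simp)) |>.mp hwe) ▸ hw
          · intro hm; exact List.mem_map_of_mem hm
        simp only [PySem.Set.add, PySem.Set.contains, hc]
        split <;> simp
      simp only [List.map_cons, List.foldl_cons, hadd]
      apply ih
      intro p q hp hq
      have hmem : ∀ w : A, w ∈ PySem.Set.add s u ∨ w ∈ t → (w ∈ s ∨ w ∈ u :: t) := by
        intro w hw
        rcases hw with hw | hw
        · rcases (PySem.Set.mem_add s u w).mp hw with h | h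
          · exact Or.inl h
          · exact Or.inr (by simp [h])
        · exact Or.inr (by simp [hw])
      exact hf p q (hmem p hp) (hmem q hq)

lemma ofList_map {A B : Type} [BEq A] [LawfulBEq A] [BEq B] [LawfulBEq B] (f : A → B)
    (l : List A) (hf : ∀ u v : A, u ∈ l → v ∈ l → (f u = f v ↔ u = v)) :
    PySem.Set.ofList (l.map f) = (PySem.Set.ofList l).map f := by
  have := foldl_add_map f l [] (by
    intro u v hu hv
    exact hf u v (by tauto) (by tauto))
  simpa [PySem.Set.ofList, PySem.Set.empty] using this

lemma key_int (a b c d x y z : Int) : acoreG a b c d x y z = bcoreG a b c d x y z := by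
  set L : List Int := [a, b, c, d, x, y, z] with hL
  set f : Int → Nat := fun v => List.idxOf v L with hfdef
  have hgetf : ∀ v ∈ L, ∃ h : f v < L.length, L[f v] = v := by
    intro v hv
    exact ⟨List.idxOf_lt_length_of_mem hv, List.getElem_idxOf _⟩
  have hfL : ∀ u v : Int, u ∈ L → v ∈ L → (f u = f v ↔ u = v) := by
    intro u v hu hv
    constructor
    · intro h
      obtain ⟨h1, e1⟩ := hgetf u hu
      obtain ⟨h2, e2⟩ := hgetf v hv
      have e1' : L[f u]? = some u := by rw [List.getElem?_eq_getElem h1, e1]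
      have e2' : L[f v]? = some v := by rw [List.getElem?_eq_getElem h2, e2]
      rw [h, e2'] at e1'
      exact (Option.some_injective _ e1').symm
    · intro h; rw [h]
  -- equivariance of the A-core
  have ed : ∀ u v : Int, u ∈ L → v ∈ L → decide (f u = f v) = decide (u = v) := by
    intro u v hu hv
    simp [hfL u v hu hv]
  have hA : acoreG (f a) (f b) (f c) (f d) (f x) (f y) (f z) = acoreG a b c d x y z := by
    simp only [acoreG,
      ed a x (by simp [hL]) (by simp [hL]), ed a y (by simp [hL]) (by simp [hL]),
      ed a z (by simp [hL]) (by simp [hL]), ed b x (by simp [hL]) (by simp [hL]),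
      ed b y (by simp [hL]) (by simp [hL]), ed b z (by simp [hL]) (by simp [hL]),
      ed c x (by simp [hL]) (by simp [hL]), ed c y (by simp [hL]) (by simp [hL]),
      ed c z (by simp [hL]) (by simp [hL]), ed d x (by simp [hL]) (by simp [hL]),
      ed d y (by simp [hL]) (by simp [hL]), ed d z (by simp [hL]) (by simp [hL])]
  -- equivariance of the B-core
  have habcd : ∀ u : Int, u ∈ ([a, b, c, d] : List Int) → u ∈ L := by
    intro u hu
    simp only [hL, List.mem_cons, List.not_mem_nil, or_false] at hu ⊢
    tauto
  have hxyz : ∀ u : Int, u ∈ ([x, y, z] : List Int) → u ∈ L := by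
    intro u hu
    simp only [hL, List.mem_cons, List.not_mem_nil, or_false] at hu ⊢
    tauto
  have hix : ∀ v : Int, v ∈ L → PySem.List.index? ([f a, f b, f c, f d] : List Nat) (f v)
      = PySem.List.index? ([a, b, c, d] : List Int) v := by
    intro v hv
    have : ([f a, f b, f c, f d] : List Nat) = ([a, b, c, d] : List Int).map f := rfl
    rw [this, PySem.List.index?_eq_idxOf?, PySem.List.index?_eq_idxOf?]
    exact idxOf?_map f v _ (fun u hu => hfL u v (habcd u hu) hv)
  have hB : bcoreG (f a) (f b) (f c) (f d) (f x) (f y) (f z) = bcoreG a b c d x y z := by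
    have hrm : fcRemoveAll ([f x, f y, f z] : List Nat) ([f a, f b, f c, f d] : List Nat)
        = (fcRemoveAll ([x, y, z] : List Int) ([a, b, c, d] : List Int)).map (List.map f) := by
      have e1 : ([f x, f y, f z] : List Nat) = ([x, y, z] : List Int).map f := rfl
      have e2 : ([f a, f b, f c, f d] : List Nat) = ([a, b, c, d] : List Int).map f := rfl
      rw [e1, e2]
      exact fcRemoveAll_map f [x, y, z] [a, b, c, d]
        (fun v hv u hu => hfL u v (habcd u hu) (hxyz v hv))
    have hdup : (PySem.Set.ofList ([f a, f b, f c, f d] : List Nat)).length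
        = (PySem.Set.ofList ([a, b, c, d] : List Int)).length := by
      have e2 : ([f a, f b, f c, f d] : List Nat) = ([a, b, c, d] : List Int).map f := rfl
      rw [e2, ofList_map f _ (fun u v hu hv => hfL u v (habcd u hu) (habcd v hv))]
      simp
    simp only [bcoreG, hrm]
    cases hrem : fcRemoveAll ([x, y, z] : List Int) ([a, b, c, d] : List Int) with
    | none => simp
    | some rest =>
        obtain ⟨w, rfl, hw⟩ := rest_singleton x y z a b c d hrem
        simp only [Option.map_some, List.map_cons, List.map_nil]
        have hh1 : ([f w] : List Nat).headD (f x) = f w := rfl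
        have hh2 : ([w] : List Int).headD x = w := rfl
        rw [hh1, hh2, hdup,
          hix x (hxyz x (by simp)), hix y (hxyz y (by simp)), hix z (hxyz z (by simp)),
          hix w (habcd w hw)]
  -- the canonical tuple satisfies the pattern condition
  have hcond_elem : ∀ v ∈ L,
      ([f a, f b, f c, f d, f x, f y, f z] : List Nat).getD (f v) 7 = f v := by
    intro v hv
    obtain ⟨h1, e1⟩ := hgetf v hv
    have hm : ([f a, f b, f c, f d, f x, f y, f z] : List Nat) = L.map f := rfl
    have hq : (L.map f)[f v]? = some (f v) := by
      rw [List.getElem?_map, List.getElem?_eq_getElem h1, e1]; rfl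
    rw [hm, List.getD_eq_getElem?_getD, hq]; rfl
  have hfa : f a = 0 := List.idxOf_cons_self
  have hbound : ∀ i : Nat, ∀ h : i < L.length, f L[i] ≤ i := fun i h => idxOf_getElem_le L i h
  have hfb : f b ≤ 1 := hbound 1 (by simp [hL])
  have hfc : f c ≤ 2 := hbound 2 (by simp [hL])
  have hfd : f d ≤ 3 := hbound 3 (by simp [hL])
  have hfx : f x ≤ 4 := hbound 4 (by simp [hL])
  have hfy : f y ≤ 5 := hbound 5 (by simp [hL])
  have hfz : f z ≤ 6 := hbound 6 (by simp [hL])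
  have hcond : pvCond [0, f b, f c, f d, f x, f y, f z] = true := by
    rw [show (0 : Nat) = f a from hfa.symm]
    simp only [pvCond, List.all_cons, List.all_nil, Bool.and_true, Bool.and_eq_true,
      decide_eq_true_eq]
    exact ⟨hcond_elem a (by simp [hL]), hcond_elem b (by simp [hL]), hcond_elem c (by simp [hL]),
      hcond_elem d (by simp [hL]), hcond_elem x (by simp [hL]), hcond_elem y (by simp [hL]),
      hcond_elem z (by simp [hL])⟩
  have k1 := List.all_eq_true.mp key_fin_bool (f b) (List.mem_range.mpr (by omega))
  have k2 := List.all_eq_true.mp k1 (f c) (List.mem_range.mpr (by omega))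
  have k3 := List.all_eq_true.mp k2 (f d) (List.mem_range.mpr (by omega))
  have k4 := List.all_eq_true.mp k3 (f x) (List.mem_range.mpr (by omega))
  have k5 := List.all_eq_true.mp k4 (f y) (List.mem_range.mpr (by omega))
  have k6 := List.all_eq_true.mp k5 (f z) (List.mem_range.mpr (by omega))
  simp only [hcond, Bool.not_true, Bool.false_or, beq_iff_eq] at k6
  have hkey : acoreG (f a) (f b) (f c) (f d) (f x) (f y) (f z)
      = bcoreG (f a) (f b) (f c) (f d) (f x) (f y) (f z) := by
    rw [hfa]; exact k6
  calc acoreG a b c d x y z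
      = acoreG (f a) (f b) (f c) (f d) (f x) (f y) (f z) := hA.symm
    _ = bcoreG (f a) (f b) (f c) (f d) (f x) (f y) (f z) := hkey
    _ = bcoreG a b c d x y z := hB

lemma shape_A_false (a b c d : Int) (o : List Int) (h : o.length ≠ 3) :
    acoreL a b c d o = false := by
  rcases o with _ | ⟨x, _ | ⟨y, _ | ⟨z, _ | ⟨w, t⟩⟩⟩⟩ <;> simp_all [acoreL]

lemma shape_B (a b c d : Int) (r : List Int) (o : List Int) (ch : String) (h : o.length ≠ 3) :
    find_chirality_from_nonh_alt (a :: b :: c :: d :: r) o ch =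
      if ch == "counterclockwise" then "clockwise" else "counterclockwise" := by
  rcases o with _ | ⟨x, _ | ⟨y, _ | ⟨z, _ | ⟨w, t⟩⟩⟩⟩ <;> simp_all [find_chirality_from_nonh_alt, pg1, pg2, pg3]

-- ===== VERDICT (by name: the statement is the Claim_ definition above) =====
theorem find_chirality_from_nonh_spec : Claim_equal_find_chirality_from_nonh := by
  intro n o ch _ hpre
  unfold Spec_find_chirality_from_nonh
  unfold Pre_find_chirality_from_nonh at hpre
  rcases n with _ | ⟨a, _ | ⟨b, _ | ⟨c, _ | ⟨d, r⟩⟩⟩⟩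
  · simp at hpre
  · simp at hpre
  · simp at hpre
  · simp at hpre
  · rcases o with _ | ⟨x, _ | ⟨y, _ | ⟨z, _ | ⟨w, t⟩⟩⟩⟩
    · rw [liftA, shape_A_false a b c d [] (by simp), shape_B a b c d r [] ch (by simp)]; simp
    · rw [liftA, shape_A_false a b c d [x] (by simp), shape_B a b c d r [x] ch (by simp)]; simp
    · rw [liftA, shape_A_false a b c d [x, y] (by simp), shape_B a b c d r [x, y] ch (by simp)]
      simp
    · rw [liftA, liftB, acoreL_eq, key_int]
    · rw [liftA, shape_A_false a b c d (x :: y :: z :: w :: t) (by simp),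
        shape_B a b c d r (x :: y :: z :: w :: t) ch (by simp)]
      simp
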